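-- pv_equiv track=rewrite | github.com/ZoyaSarwar-Tech/palindrome-checker-python | Palindrome checker.py | find_palindrome_in_sentence
-- ===== SOURCE A (Python) =====
-- def find_palindrome_in_sentence(sentence):
--     words = sentence.split()
--
--     palindrome=[]
--     for word in words:
--         cleaned_word="".join(c.lower() for c in word if c.isalpha())
--         if cleaned_word==cleaned_word[ ::-1]:
--             palindrome.append(word)
--     return palindrome
-- ===== SOURCE B (Python) =====
-- def _is_pal(word):
--     # two-pointer ends-inward scan on the original word: skip non-letters at
--     # each end, compare the two end letters case-insensitively, move inward
--     l, r = 0, len(word) - 1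
--     while l < r:
--         if not word[l].isalpha():
--             l += 1
--         elif not word[r].isalpha():
--             r -= 1
--         elif word[l].lower() == word[r].lower():
--             l += 1
--             r -= 1
--         else:
--             return False
--     return True
--
--
-- def find_palindrome_in_sentence(sentence):
--     return [word for word in sentence.split() if _is_pal(word)]
-- ===== Notes on version B (the rewrite author's own statement) =====
-- stated objective: alternative
-- what changed: B replaces A's build-cleaned-string-then-compare-with-reverse check by a recursive ends-inward scan on the original word (skip non-letters at each end, compare the two end letters case-insensitively, recurse on the middle), and the outer accumulator loop becomes a filter comprehension.
import Mathlib
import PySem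

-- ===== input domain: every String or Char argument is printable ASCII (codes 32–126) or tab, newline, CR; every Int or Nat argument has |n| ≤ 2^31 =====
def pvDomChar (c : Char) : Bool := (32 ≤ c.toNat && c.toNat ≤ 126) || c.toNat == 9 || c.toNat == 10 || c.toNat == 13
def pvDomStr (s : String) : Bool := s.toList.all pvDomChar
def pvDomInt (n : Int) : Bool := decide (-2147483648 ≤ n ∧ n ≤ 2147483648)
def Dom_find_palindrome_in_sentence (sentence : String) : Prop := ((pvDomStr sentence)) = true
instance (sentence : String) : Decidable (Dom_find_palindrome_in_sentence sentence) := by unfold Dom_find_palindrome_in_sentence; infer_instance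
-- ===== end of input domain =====

-- ===== PORT A =====
-- B differs from A by checking each word with an in-place two-pointer ends-inward scan
-- instead of building a cleaned lowercase string and comparing it with its reverse. (objective: alternative)
def find_palindrome_in_sentence (sentence : String) : List String :=
  let words := PySem.Str.split₀ sentence
  words.foldl (fun palindrome word =>
    let cleaned := (word.toList.filter (fun c => PySem.Chars.isalpha c)).map PySem.Chars.lowerChar
    -- cleaned_word[::-1] is the step -1 slice
    if some cleaned == PySem.List.slice? cleaned none none (-1) then palindrome ++ [word]
    else palindrome) []

-- ===== PORT B =====
-- the 'while l < r' loop of _is_pal in Source B, one constructor per branch;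
-- the loop invariant keeps l, r in range, so cs.getD l/r ' ' reads word[l]/word[r]
def twoPtr (cs : List Char) (l r : Nat) : Bool :=
  if h : l < r then
    if PySem.Chars.isalpha (cs.getD l ' ') = false then twoPtr cs (l + 1) r
    else if PySem.Chars.isalpha (cs.getD r ' ') = false then twoPtr cs l (r - 1)
    else if PySem.Chars.lowerChar (cs.getD l ' ') == PySem.Chars.lowerChar (cs.getD r ' ') then
      twoPtr cs (l + 1) (r - 1)
    else false
  else true
termination_by r - l
decreasing_by all_goals omega

-- r starts at len(word) - 1; for the empty word Python's r = -1 and this Nat 0 - 1 = 0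
-- both fail the 'l < r' test at once, so the loop body is never entered either way
def find_palindrome_in_sentence_alt (sentence : String) : List String :=
  (PySem.Str.split₀ sentence).filter
    (fun word => twoPtr word.toList 0 (word.toList.length - 1))

-- ===== PRECONDITION & SPEC =====
def Spec_find_palindrome_in_sentence (sentence : String) (out : List String) : Prop := out = find_palindrome_in_sentence_alt sentence
instance (sentence : String) (out : List String) : Decidable (Spec_find_palindrome_in_sentence sentence out) := by unfold Spec_find_palindrome_in_sentence; infer_instance

-- ===== CLAIM (what is proved, stated in full; the proofs are below) =====
def Claim_equal_find_palindrome_in_sentence : Prop := ∀ (sentence : String), Dom_find_palindrome_in_sentence sentence → Spec_find_palindrome_in_sentence sentence (find_palindrome_in_sentence sentence)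

-- ===== LEMMAS AND PROOFS =====

-- A's per-word cleaned string
def cleanChars (cs : List Char) : List Char :=
  (cs.filter (fun c => PySem.Chars.isalpha c)).map PySem.Chars.lowerChar

-- proof-side bridge: ends-inward recursion on a list, mediating between
-- twoPtr (index form) and cleanChars==reverse (A's form)
def palAux : List Char → Bool
  | [] => true
  | c :: t =>
    if PySem.Chars.isalpha c = false then palAux t
    else if PySem.Chars.isalpha ((c :: t).getLast (by simp)) = false then
      palAux ((c :: t).dropLast)
    else if t.length = 0 then true
    else
      (PySem.Chars.lowerChar c == PySem.Chars.lowerChar ((c :: t).getLast (by simp)))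
        && palAux t.dropLast
termination_by cs => cs.length
decreasing_by all_goals simp [List.length_dropLast]

lemma getLast_of_eq {α : Type} (xs : List α) (c : α) (t : List α) (e : xs = c :: t)
    (hne : xs ≠ []) : (c :: t).getLast (by simp) = xs.getLast hne := by
  subst e; rfl

lemma pal_sandwich (a b : Char) (l : List Char) :
    ((a :: (l ++ [b])) == (b :: (l.reverse ++ [a]))) = ((a == b) && (l == l.reverse)) := by
  rw [Bool.eq_iff_iff]
  simp only [Bool.and_eq_true, beq_iff_eq, List.cons.injEq]
  constructor
  · rintro ⟨rfl, h2⟩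
    obtain ⟨h3, _⟩ := List.append_inj h2 (by simp)
    exact ⟨rfl, h3⟩
  · rintro ⟨rfl, h2⟩
    exact ⟨rfl, by rw [← h2]⟩

lemma palAux_eq_clean (cs : List Char) :
    palAux cs = (cleanChars cs == (cleanChars cs).reverse) := by
  induction cs using palAux.induct with
  | case1 => simp [palAux, cleanChars]
  | case2 c t h ih =>
      rw [palAux]
      simp only [h, if_true]
      rw [ih]
      have : cleanChars (c :: t) = cleanChars t := by
        simp [cleanChars, h]
      rw [this]
  | case3 c t h hl ih =>
      have hc : PySem.Chars.isalpha c = true := by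
        revert h; cases PySem.Chars.isalpha c <;> simp
      rw [palAux]
      simp only [hc, hl, Bool.true_eq_false, if_false, if_true]
      rw [ih]
      have hd : (c :: t) = (c :: t).dropLast ++ [(c :: t).getLast (by simp)] :=
        (List.dropLast_append_getLast (by simp)).symm
      have hcl : cleanChars (c :: t) = cleanChars ((c :: t).dropLast) := by
        conv_lhs => rw [hd]
        simp [cleanChars, List.filter_append, hl]
      rw [hcl]
  | case4 c t h hl ht =>
      have hc : PySem.Chars.isalpha c = true := by
        revert h; cases PySem.Chars.isalpha c <;> simp
      have ht' : t = [] := List.length_eq_zero_iff.mp ht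
      subst ht'
      rw [palAux]
      simp [hc, cleanChars]
  | case5 c t h hl ht ih =>
      have hc : PySem.Chars.isalpha c = true := by
        revert h; cases PySem.Chars.isalpha c <;> simp
      have hla : PySem.Chars.isalpha ((c :: t).getLast (by simp)) = true := by
        revert hl; cases PySem.Chars.isalpha ((c :: t).getLast (by simp)) <;> simp
      have htne : t ≠ [] := fun e => by subst e; simp at ht
      have hlast : (c :: t).getLast (by simp) = t.getLast htne := List.getLast_cons htne
      have halpha : PySem.Chars.isalpha (t.getLast htne) = true := hlast ▸ hla
      rw [palAux]
      simp only [hc, hla, Bool.true_eq_false, if_false, ht]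
      have hclean : cleanChars (c :: t)
          = PySem.Chars.lowerChar c ::
              (cleanChars t.dropLast ++ [PySem.Chars.lowerChar (t.getLast htne)]) := by
        conv_lhs => rw [show (c :: t) = c :: (t.dropLast ++ [t.getLast htne]) from by
          rw [List.dropLast_append_getLast htne]]
        simp [cleanChars, List.filter_append, hc, halpha]
      have hrev : (PySem.Chars.lowerChar c ::
              (cleanChars t.dropLast ++ [PySem.Chars.lowerChar (t.getLast htne)])).reverse
          = PySem.Chars.lowerChar (t.getLast htne) ::
              ((cleanChars t.dropLast).reverse ++ [PySem.Chars.lowerChar c]) := by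
        simp
      rw [hclean, hrev, pal_sandwich, ih, hlast]

lemma palAux_short (cs : List Char) (h : cs.length ≤ 1) : palAux cs = true := by
  match cs, h with
  | [], _ => rw [palAux]
  | [c], _ =>
      rw [palAux]
      by_cases hc : PySem.Chars.isalpha c = false <;> simp [hc, palAux]

lemma twoPtr_eq_palAux (cs : List Char) (l r : Nat) (hr : r < cs.length) :
    twoPtr cs l r = palAux ((cs.take (r + 1)).drop l) := by
  induction l, r using twoPtr.induct cs with
  | case1 l r h ha ih =>
      have hl : l < cs.length := by omega
      rw [twoPtr]
      simp only [dif_pos h, ha, if_true]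
      rw [ih hr]
      have hseg : (cs.take (r + 1)).drop l
          = cs[l] :: (cs.take (r + 1)).drop (l + 1) := by
        rw [List.drop_eq_getElem_cons (show l < (cs.take (r + 1)).length by
          simp [List.length_take]; omega)]
        congr 1
        simp [List.getElem_take]
      rw [hseg, palAux]
      have hgl : cs.getD l ' ' = cs[l] := List.getD_eq_getElem cs ' ' hl
      rw [hgl] at ha
      simp only [ha, if_true]
  | case2 l r h ha hb ih =>
      have hl : l < cs.length := by omega
      have hri : r - 1 + 1 = r := by omega
      rw [hri] at ih
      rw [twoPtr]
      simp only [dif_pos h, ha, hb, Bool.true_eq_false, if_false, if_true]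
      rw [ih (by omega)]
      have hlen : ((cs.take (r + 1)).drop l).length = r + 1 - l := by
        simp [List.length_take, List.length_drop]; omega
      have hne : (cs.take (r + 1)).drop l ≠ [] := by
        intro e
        have := congrArg List.length e
        rw [hlen] at this
        simp at this
        omega
      have hlastseg : ((cs.take (r + 1)).drop l).getLast hne = cs[r] := by
        rw [List.getLast_eq_getElem]
        simp only [List.getElem_drop, List.getElem_take, hlen]
        congr 1
        omega
      have hdl : ((cs.take (r + 1)).drop l).dropLast = (cs.take r).drop l := by
        rw [List.dropLast_eq_take, hlen, List.take_drop]
        have h1 : l + (r + 1 - l - 1) = r := by omega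
        rw [h1, List.take_take]
        have h2 : min r (r + 1) = r := by omega
        rw [h2]
      obtain ⟨c, t, e⟩ := List.exists_cons_of_ne_nil hne
      have hcc : c = cs[l] := by
        have := congrArg (fun xs => xs.headD ' ') e
        simpa [List.headD, List.drop_eq_getElem_cons (show l < (cs.take (r + 1)).length by
          simp [List.length_take]; omega), List.getElem_take] using this.symm
      rw [e, palAux]
      have hca : PySem.Chars.isalpha c = true := by
        rw [hcc, ← List.getD_eq_getElem cs ' ' hl]
        revert ha; cases hx : PySem.Chars.isalpha (cs.getD l ' ') <;> simp [hx]
      have hlastc : (c :: t).getLast (by simp) = cs[r] :=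
        (getLast_of_eq _ c t e hne).trans hlastseg
      have hbl : PySem.Chars.isalpha ((c :: t).getLast (by simp)) = false := by
        rw [hlastc, ← List.getD_eq_getElem cs ' ' hr]
        exact hb
      simp only [hca, Bool.true_eq_false, if_false, hbl, if_true]
      rw [← e, hdl]
  | case3 l r h ha hb hlow ih =>
      have hl : l < cs.length := by omega
      have hri : r - 1 + 1 = r := by omega
      rw [hri] at ih
      rw [twoPtr]
      simp only [dif_pos h, ha, hb, Bool.true_eq_false, if_false, hlow, if_true]
      rw [ih (by omega)]
      have hlen : ((cs.take (r + 1)).drop l).length = r + 1 - l := by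
        simp [List.length_take, List.length_drop]; omega
      have hne : (cs.take (r + 1)).drop l ≠ [] := by
        intro e
        have := congrArg List.length e
        rw [hlen] at this
        simp at this
        omega
      obtain ⟨c, t, e⟩ := List.exists_cons_of_ne_nil hne
      have hcc : c = cs[l] := by
        have := congrArg (fun xs => xs.headD ' ') e
        simpa [List.headD, List.drop_eq_getElem_cons (show l < (cs.take (r + 1)).length by
          simp [List.length_take]; omega), List.getElem_take] using this.symm
      have hgl : cs.getD l ' ' = cs[l] := List.getD_eq_getElem cs ' ' hl
      have hgr : cs.getD r ' ' = cs[r] := List.getD_eq_getElem cs ' ' hr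
      have hca : PySem.Chars.isalpha c = true := by
        rw [hcc, ← hgl]
        revert ha; cases hx : PySem.Chars.isalpha (cs.getD l ' ') <;> simp [hx]
      have hlastseg : ((cs.take (r + 1)).drop l).getLast hne = cs[r] := by
        rw [List.getLast_eq_getElem]
        simp only [List.getElem_drop, List.getElem_take, hlen]
        congr 1
        omega
      have hlastc : (c :: t).getLast (by simp) = cs[r] :=
        (getLast_of_eq _ c t e hne).trans hlastseg
      have hba : PySem.Chars.isalpha ((c :: t).getLast (by simp)) = true := by
        rw [hlastc, ← hgr]
        revert hb; cases hx : PySem.Chars.isalpha (cs.getD r ' ') <;> simp [hx]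
      have htlen : t.length = r - l := by
        have := congrArg List.length e
        rw [hlen] at this
        simp at this
        omega
      have htne : t.length ≠ 0 := by omega
      rw [e, palAux]
      simp only [hca, hba, Bool.true_eq_false, if_false, htne, if_true]
      have hlowc : (PySem.Chars.lowerChar c == PySem.Chars.lowerChar ((c :: t).getLast (by simp)))
          = true := by
        rw [hlastc, hcc, ← hgl, ← hgr]
        exact hlow
      rw [hlowc, Bool.true_and]
      -- t.dropLast is the segment (l+1) .. (r-1)
      have hdlseg : ((cs.take (r + 1)).drop l).dropLast = (cs.take r).drop l := by
        rw [List.dropLast_eq_take, hlen, List.take_drop]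
        have h1 : l + (r + 1 - l - 1) = r := by omega
        rw [h1, List.take_take]
        have h2 : min r (r + 1) = r := by omega
        rw [h2]
      have h2 : (c :: t).dropLast = c :: t.dropLast := by
        cases t with
        | nil => simp at htne
        | cons x xs => simp
      have h3 : c :: t.dropLast = (cs.take r).drop l := by
        rw [← h2, ← e]; exact hdlseg
      have h4 : (cs.take r).drop l = cs[l] :: (cs.take r).drop (l + 1) := by
        rw [List.drop_eq_getElem_cons (show l < (cs.take r).length by
          simp [List.length_take]; omega)]
        congr 1
        simp [List.getElem_take]
      rw [h4, hcc] at h3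
      rw [((List.cons.injEq _ _ _ _).mp h3).2]
  | case4 l r h ha hb hlow =>
      have hl : l < cs.length := by omega
      rw [twoPtr]
      simp only [dif_pos h, ha, hb, Bool.true_eq_false, if_false, hlow]
      have hlen : ((cs.take (r + 1)).drop l).length = r + 1 - l := by
        simp [List.length_take, List.length_drop]; omega
      have hne : (cs.take (r + 1)).drop l ≠ [] := by
        intro e
        have := congrArg List.length e
        rw [hlen] at this
        simp at this
        omega
      obtain ⟨c, t, e⟩ := List.exists_cons_of_ne_nil hne
      have hcc : c = cs[l] := by
        have := congrArg (fun xs => xs.headD ' ') e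
        simpa [List.headD, List.drop_eq_getElem_cons (show l < (cs.take (r + 1)).length by
          simp [List.length_take]; omega), List.getElem_take] using this.symm
      have hgl : cs.getD l ' ' = cs[l] := List.getD_eq_getElem cs ' ' hl
      have hgr : cs.getD r ' ' = cs[r] := List.getD_eq_getElem cs ' ' hr
      have hca : PySem.Chars.isalpha c = true := by
        rw [hcc, ← hgl]
        revert ha; cases hx : PySem.Chars.isalpha (cs.getD l ' ') <;> simp [hx]
      have hlastseg : ((cs.take (r + 1)).drop l).getLast hne = cs[r] := by
        rw [List.getLast_eq_getElem]
        simp only [List.getElem_drop, List.getElem_take, hlen]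
        congr 1
        omega
      have hlastc : (c :: t).getLast (by simp) = cs[r] :=
        (getLast_of_eq _ c t e hne).trans hlastseg
      have hba : PySem.Chars.isalpha ((c :: t).getLast (by simp)) = true := by
        rw [hlastc, ← hgr]
        revert hb; cases hx : PySem.Chars.isalpha (cs.getD r ' ') <;> simp [hx]
      have htne : t.length ≠ 0 := by
        have := congrArg List.length e
        rw [hlen] at this
        simp at this
        omega
      rw [e, palAux]
      simp only [hca, hba, Bool.true_eq_false, if_false, htne]
      have hlowc : (PySem.Chars.lowerChar c == PySem.Chars.lowerChar ((c :: t).getLast (by simp)))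
          = false := by
        rw [hlastc, hcc, ← hgl, ← hgr]
        revert hlow
        cases hx : (PySem.Chars.lowerChar (cs.getD l ' ') == PySem.Chars.lowerChar (cs.getD r ' '))
          <;> simp [hx]
      rw [hlowc, Bool.false_and]
      simp
  | case5 l r h =>
      rw [twoPtr]
      rw [dif_neg h]
      rw [palAux_short]
      simp [List.length_take, List.length_drop]
      omega

lemma twoPtr_full (cs : List Char) :
    twoPtr cs 0 (cs.length - 1) = (cleanChars cs == (cleanChars cs).reverse) := by
  cases cs with
  | nil =>
      rw [twoPtr]
      simp [cleanChars]
  | cons c t =>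
      rw [twoPtr_eq_palAux (c :: t) 0 ((c :: t).length - 1) (by simp)]
      have : ((c :: t).take ((c :: t).length - 1 + 1)).drop 0 = c :: t := by
        simp
      rw [this, palAux_eq_clean]

-- ===== VERDICT (by name: the statement is the Claim_ definition above) =====
theorem find_palindrome_in_sentence_spec : Claim_equal_find_palindrome_in_sentence := by
  intro sentence _
  unfold Spec_find_palindrome_in_sentence
  unfold find_palindrome_in_sentence find_palindrome_in_sentence_alt
  simp only [PySem.List.slice?_none_none_neg_one]
  rw [PySem.List.foldl_append_if_eq_filter]
  rw [List.nil_append]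
  apply List.filter_congr
  intro w _
  rw [twoPtr_full]
  simp [cleanChars]
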